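-- pv_equiv track=rewrite | github.com/myafa/study | coding/codility_4_2_FrogRiverOne_ik.py | solution
-- ===== SOURCE A (Python) =====
-- def solution(X, A):
--     temp = {}
--     if X==0:
--         return 0
--     for i in range(len(A)):
--         if A[i] in temp.keys():
--             temp[A[i]]+=1
--         else:
--             temp[A[i]]=1
--         if len(temp)==X:
--             return i
--     return -1
-- ===== SOURCE B (Python) =====
-- def solution(X, A):
--     # Map each value to its first index by overwriting a dict while scanning A
--     # backwards, then sort the first-occurrence indices and pick the X-th smallest.
--     if X == 0:
--         return 0
--     first = {}
--     for i, v in reversed(list(enumerate(A))):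
--         first[v] = i
--     idxs = sorted(first.values())
--     if 1 <= X <= len(idxs):
--         return idxs[X - 1]
--     return -1
-- ===== Notes on version B (the rewrite author's own statement) =====
-- stated objective: alternative
-- what changed: A scans forward counting occurrences in a dict and early-returns when the dict's size reaches X; B has no membership test or counter at all: it builds a value-to-first-index map by overwriting a dict while scanning A backwards, then sorts the first-occurrence indices and selects the X-th smallest.
import Mathlib
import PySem

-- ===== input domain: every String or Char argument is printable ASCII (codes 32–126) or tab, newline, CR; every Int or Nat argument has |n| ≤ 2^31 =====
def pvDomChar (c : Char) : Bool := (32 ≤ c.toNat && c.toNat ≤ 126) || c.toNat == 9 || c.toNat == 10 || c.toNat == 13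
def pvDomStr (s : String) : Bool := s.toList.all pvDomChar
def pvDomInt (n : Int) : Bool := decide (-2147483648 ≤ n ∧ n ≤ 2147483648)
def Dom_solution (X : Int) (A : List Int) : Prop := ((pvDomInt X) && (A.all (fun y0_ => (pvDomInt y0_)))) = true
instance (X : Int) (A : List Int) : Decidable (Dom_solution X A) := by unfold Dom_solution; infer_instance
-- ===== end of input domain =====

-- B replaces A's count-in-a-dict forward scan with an early return by a reversed-scan
-- overwrite dict (value -> first index) followed by a sort of the first indices; alternative algorithm, same task.

-- ===== PORT A =====
-- the for-loop over range(len(A)): i is the running index, temp the counting dict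
def solutionLoop (X : Int) (temp : PySem.Dict Int Int) (i : Nat) : List Int → Int
  | [] => -1
  | a :: rest =>
    let temp' := if temp.contains a then temp.insert a (temp.getD a 0 + 1) else temp.insert a 1
    if (temp'.size : Int) = X then (i : Int) else solutionLoop X temp' (i + 1) rest

def solution (X : Int) (A : List Int) : Int :=
  if X = 0 then 0 else solutionLoop X PySem.Dict.empty 0 A

-- ===== PORT B =====
def solution_alt (X : Int) (A : List Int) : Int :=
  if X = 0 then 0
  else
    -- for i, v in reversed(list(enumerate(A))): first[v] = i
    let first := ((PySem.List.enumerate A 0).reverse).foldl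
      (fun (d : PySem.Dict Int Int) p => d.insert p.2 p.1) PySem.Dict.empty
    let idxs := PySem.List.sorted first.values (fun x => x) false
    if 1 ≤ X ∧ X ≤ (idxs.length : Int) then PySem.List.pyGetD idxs (X - 1) (-1) else -1

-- ===== PRECONDITION & SPEC =====
def Spec_solution (X : Int) (A : List Int) (out : Int) : Prop := out = solution_alt X A
instance (X : Int) (A : List Int) (out : Int) : Decidable (Spec_solution X A out) := by unfold Spec_solution; infer_instance

-- ===== CLAIM (what is proved, stated in full; the proofs are below) =====
def Claim_equal_solution : Prop := ∀ (X : Int) (A : List Int), Dom_solution X A → Spec_solution X A (solution X A)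

-- ===== LEMMAS AND PROOFS =====

-- proof-side common spec: (value, index) pairs of first occurrences of values not in seen
def firstsP (seen : PySem.Set Int) (i : Nat) : List Int → List (Int × Nat)
  | [] => []
  | a :: rest =>
    if PySem.Set.contains seen a then firstsP seen (i + 1) rest
    else (a, i) :: firstsP (PySem.Set.add seen a) (i + 1) rest

-- first index (from s) at which v occurs in the list
def lkF (v : Int) : List Int → Int → Option Int
  | [], _ => none
  | a :: rest, s => if a = v then some s else lkF v rest (s + 1)

lemma loopA_neg (l : List Int) : ∀ (X : Int) (temp : PySem.Dict Int Int) (i : Nat),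
    X < 0 → solutionLoop X temp i l = -1 := by
  induction l with
  | nil => intro X temp i h; simp [solutionLoop]
  | cons a rest ih =>
    intro X temp i h
    simp only [solutionLoop]
    rw [if_neg (by omega), ih _ _ _ h]

lemma loopA_eq (l : List Int) : ∀ (i : Nat) (temp : PySem.Dict Int Int) (n : Nat),
    solutionLoop ((temp.size : Int) + (n : Int) + 1) temp i l
      = (match (firstsP temp.keys i l)[n]? with
         | some p => (p.2 : Int)
         | none => -1) := by
  induction l with
  | nil => intro i temp n; simp [solutionLoop, firstsP]
  | cons a rest ih =>
    intro i temp n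
    simp only [solutionLoop, firstsP]
    by_cases hc : temp.contains a = true
    · have hck : PySem.Set.contains temp.keys a = true := by
        simpa [PySem.Set.contains, PySem.Dict.contains_eq_decide_mem_keys,
               List.contains_iff_mem] using hc
      rw [if_pos hc, hck]
      have hsz : ((temp.insert a (temp.getD a 0 + 1)).size : Int) = temp.size := by
        rw [PySem.Dict.size_insert]; simp [hc]
      have hk : (temp.insert a (temp.getD a 0 + 1)).keys = temp.keys :=
        PySem.Dict.keys_insert_of_contains _ _ hc
      rw [if_neg (by omega)]
      have := ih (i + 1) (temp.insert a (temp.getD a 0 + 1)) n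
      rw [hsz, hk] at this
      simpa using this
    · have hck : PySem.Set.contains temp.keys a = false := by
        simpa [PySem.Set.contains, PySem.Dict.contains_eq_decide_mem_keys,
               List.contains_iff_mem] using hc
      rw [if_neg hc, hck]
      have hsz : ((temp.insert a 1).size : Int) = temp.size + 1 := by
        rw [PySem.Dict.size_insert]; simp [hc]
      have hmem : a ∉ temp.keys := by
        rw [← PySem.Dict.contains_iff_mem_keys]; simpa using hc
      have hk : (temp.insert a 1).keys = PySem.Set.add temp.keys a := by
        rw [PySem.Dict.keys_insert_of_not_contains _ _ (by simpa using hc)]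
        simp [PySem.Set.add, hmem]
      cases n with
      | zero =>
        rw [if_pos (by omega)]
        simp
      | succ n' =>
        rw [if_neg (by omega)]
        have := ih (i + 1) (temp.insert a 1) n'
        rw [hk] at this
        rw [show ((temp.size : Int) + ((n' + 1 : Nat) : Int) + 1)
              = ((temp.insert a 1).size : Int) + (n' : Int) + 1 by rw [hsz]; push_cast; ring]
        simpa using this

-- membership of the fst components of firstsP
lemma mem_fst_firstsP (l : List Int) : ∀ (S : PySem.Set Int) (i : Nat) (v : Int),
    v ∈ (firstsP S i l).map (·.1) ↔ v ∈ l ∧ v ∉ S := by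
  induction l with
  | nil => intro S i v; simp [firstsP]
  | cons a rest ih =>
    intro S i v
    simp only [firstsP]
    by_cases hc : PySem.Set.contains S a = true
    · have ha : a ∈ S := (PySem.Set.contains_iff _ _).mp hc
      rw [if_pos hc, ih]
      simp only [List.mem_cons]
      constructor
      · rintro ⟨hm, hns⟩; exact ⟨Or.inr hm, hns⟩
      · rintro ⟨hm, hns⟩
        rcases hm with h | h
        · exact absurd (h ▸ ha) hns
        · exact ⟨h, hns⟩
    · have ha : a ∉ S := fun h => hc ((PySem.Set.contains_iff _ _).mpr h)
      rw [if_neg hc]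
      simp only [List.map_cons, List.mem_cons, ih, PySem.Set.mem_add]
      constructor
      · rintro (h | ⟨hm, hns⟩)
        · exact ⟨by simp [h], h ▸ ha⟩
        · exact ⟨Or.inr hm, fun hv => hns (Or.inl hv)⟩
      · rintro ⟨hm, hns⟩
        rcases hm with h | h
        · exact Or.inl h
        · by_cases hv : v = a
          · exact Or.inl hv
          · exact Or.inr ⟨h, fun hh => hh.elim hns hv⟩

lemma nodup_fst_firstsP (l : List Int) : ∀ (S : PySem.Set Int) (i : Nat),
    ((firstsP S i l).map (·.1)).Nodup := by
  induction l with
  | nil => intro S i; simp [firstsP]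
  | cons a rest ih =>
    intro S i
    simp only [firstsP]
    by_cases hc : PySem.Set.contains S a = true
    · rw [if_pos hc]; exact ih _ _
    · rw [if_neg hc]
      simp only [List.map_cons, List.nodup_cons]
      refine ⟨fun hmem => ?_, ih _ _⟩
      have := (mem_fst_firstsP rest (PySem.Set.add S a) (i + 1) a).mp hmem
      exact this.2 (by simp [PySem.Set.mem_add])

lemma le_snd_firstsP (l : List Int) : ∀ (S : PySem.Set Int) (i : Nat),
    ∀ p ∈ firstsP S i l, i ≤ p.2 := by
  induction l with
  | nil => intro S i p hp; simp [firstsP] at hp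
  | cons a rest ih =>
    intro S i p hp
    simp only [firstsP] at hp
    by_cases hc : PySem.Set.contains S a = true
    · rw [if_pos hc] at hp; exact le_of_lt (lt_of_lt_of_le (Nat.lt_succ_self i) (ih _ _ _ hp))
    · rw [if_neg hc] at hp
      rcases List.mem_cons.mp hp with h | h
      · simp [h]
      · exact le_of_lt (lt_of_lt_of_le (Nat.lt_succ_self i) (ih _ _ _ h))

lemma pairwise_snd_firstsP (l : List Int) : ∀ (S : PySem.Set Int) (i : Nat),
    (firstsP S i l).Pairwise (fun p q => p.2 < q.2) := by
  induction l with
  | nil => intro S i; simp [firstsP]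
  | cons a rest ih =>
    intro S i
    simp only [firstsP]
    by_cases hc : PySem.Set.contains S a = true
    · rw [if_pos hc]; exact ih _ _
    · rw [if_neg hc]
      refine List.pairwise_cons.mpr ⟨fun q hq => ?_, ih _ _⟩
      exact lt_of_lt_of_le (Nat.lt_succ_self i) (le_snd_firstsP rest _ _ q hq)

-- a pair in firstsP names the first occurrence: the linear search lkF finds exactly it
lemma mem_firstsP_lkF (l : List Int) : ∀ (S : PySem.Set Int) (i : Nat) (v : Int) (j : Nat),
    (v, j) ∈ firstsP S i l → v ∉ S ∧ lkF v l (i : Int) = some (j : Int) := by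
  induction l with
  | nil => intro S i v j h; simp [firstsP] at h
  | cons a rest ih =>
    intro S i v j h
    simp only [firstsP] at h
    by_cases hc : PySem.Set.contains S a = true
    · rw [if_pos hc] at h
      obtain ⟨hns, hlk⟩ := ih _ _ _ _ h
      have hva : v ≠ a := by
        rintro rfl; exact hns ((PySem.Set.contains_iff _ _).mp hc)
      have hav : ¬ (a = v) := fun hh => hva hh.symm
      refine ⟨hns, ?_⟩
      simp only [lkF, if_neg hav]
      exact_mod_cast hlk
    · have ha : a ∉ S := fun hh => hc ((PySem.Set.contains_iff _ _).mpr hh)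
      rw [if_neg hc] at h
      rcases List.mem_cons.mp h with hh | hh
      · obtain ⟨h1, h2⟩ := Prod.mk.inj hh
        subst h1; subst h2
        exact ⟨ha, by simp [lkF]⟩
      · obtain ⟨hns, hlk⟩ := ih _ _ _ _ hh
        have hva : v ≠ a := by
          rintro rfl; exact hns (by simp [PySem.Set.mem_add])
        have hns' : v ∉ S := fun hv => hns (by simp [PySem.Set.mem_add, hv])
        have hav : ¬ (a = v) := fun hh' => hva hh'.symm
        refine ⟨hns', ?_⟩
        simp only [lkF, if_neg hav]
        exact_mod_cast hlk

-- the reversed-enumerate overwrite fold looked up = linear first-occurrence search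
lemma get?_revFold (l : List Int) : ∀ (s : Int) (d : PySem.Dict Int Int) (v : Int),
    (((PySem.List.enumerate l s).reverse).foldl
        (fun (d : PySem.Dict Int Int) p => d.insert p.2 p.1) d).get? v
      = ((lkF v l s).elim (d.get? v) some) := by
  induction l with
  | nil => intro s d v; simp [PySem.List.enumerate, lkF]
  | cons a rest ih =>
    intro s d v
    rw [PySem.List.enumerate_cons]
    rw [List.reverse_cons, List.foldl_append]
    simp only [List.foldl_cons, List.foldl_nil]
    rw [PySem.Dict.get?_insert]
    simp only [lkF]
    by_cases hv : v = a
    · subst hv; simp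
    · have hav : ¬ (v = a) := hv
      have hav' : ¬ (a = v) := fun hh => hv hh.symm
      rw [if_neg hav, if_neg hav', ih]

lemma keys_revFold_mem (A : List Int) (v : Int) :
    v ∈ (((PySem.List.enumerate A 0).reverse).foldl
        (fun (d : PySem.Dict Int Int) p => d.insert p.2 p.1) PySem.Dict.empty).keys ↔ v ∈ A := by
  rw [PySem.Dict.keys_foldl_insert_key]
  rw [PySem.Dict.keys_empty]
  rw [PySem.Set.mem_update]
  simp [PySem.List.map_snd_enumerate]

lemma nodup_keys_revFold (A : List Int) :
    (((PySem.List.enumerate A 0).reverse).foldl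
        (fun (d : PySem.Dict Int Int) p => d.insert p.2 p.1) PySem.Dict.empty).keys.Nodup :=
  PySem.Dict.nodup_keys_foldl_insert_key _ _ _ _ PySem.Dict.nodup_keys_empty

-- sorted first-occurrence values of the overwrite dict = snd components of firstsP
lemma sorted_values_eq (A : List Int) :
    PySem.List.sorted (((PySem.List.enumerate A 0).reverse).foldl
        (fun (d : PySem.Dict Int Int) p => d.insert p.2 p.1) PySem.Dict.empty).values
      (fun x => x) false
      = (firstsP PySem.Set.empty 0 A).map (fun p => (p.2 : Int)) := by
  set D := ((PySem.List.enumerate A 0).reverse).foldl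
      (fun (d : PySem.Dict Int Int) p => d.insert p.2 p.1) PySem.Dict.empty with hD
  have hnd : D.keys.Nodup := nodup_keys_revFold A
  have hvals : D.values = D.keys.map (fun k => D.getD k 0) :=
    PySem.Dict.values_eq_map_keys D hnd 0
  have hkperm : D.keys.Perm ((firstsP PySem.Set.empty 0 A).map (·.1)) := by
    rw [List.perm_ext_iff_of_nodup hnd (nodup_fst_firstsP A _ _)]
    intro v
    rw [hD, keys_revFold_mem, mem_fst_firstsP]
    simp [PySem.Set.empty]
  have hmapeq : ((firstsP PySem.Set.empty 0 A).map (·.1)).map (fun k => D.getD k 0)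
      = (firstsP PySem.Set.empty 0 A).map (fun p => (p.2 : Int)) := by
    rw [List.map_map]
    refine List.map_congr_left (fun p hp => ?_)
    obtain ⟨-, hlk⟩ := mem_firstsP_lkF A _ _ p.1 p.2 (by simpa using hp)
    simp only [Function.comp]
    rw [PySem.Dict.getD_eq_get?_getD, hD, get?_revFold]
    simp at hlk
    rw [hlk]
    simp
  have hperm : ((firstsP PySem.Set.empty 0 A).map (fun p => (p.2 : Int))).Perm D.values := by
    rw [hvals, ← hmapeq]
    exact (hkperm.map _).symm
  refine PySem.List.sorted_eq_of_perm_of_pairwise_lt _ _ _ hperm ?_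
  have := pairwise_snd_firstsP A PySem.Set.empty 0
  exact (List.pairwise_map.mpr (this.imp (fun h => by exact_mod_cast h)))

-- ===== VERDICT (by name: the statement is the Claim_ definition above) =====
theorem solution_spec : Claim_equal_solution := by
  intro X A _
  unfold Spec_solution solution solution_alt
  by_cases h0 : X = 0
  · simp [h0]
  · rw [if_neg h0, if_neg h0]
    simp only []
    rw [sorted_values_eq]
    by_cases hneg : X < 0
    · rw [loopA_neg _ _ _ _ hneg, if_neg (by intro h; omega)]
    · obtain ⟨n, hn⟩ : ∃ n : Nat, X = (n : Int) + 1 := ⟨(X - 1).toNat, by omega⟩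
      have hA := loopA_eq A 0 PySem.Dict.empty n
      have hkeys : (PySem.Dict.empty : PySem.Dict Int Int).keys = PySem.Set.empty := rfl
      have hsz : ((PySem.Dict.empty : PySem.Dict Int Int).size : Int) = 0 := rfl
      rw [hkeys, hsz] at hA
      rw [show X = (0 : Int) + (n : Int) + 1 by omega]; rw [hA]
      simp only [List.length_map]
      cases hget : (firstsP PySem.Set.empty 0 A)[n]? with
      | some p =>
        have hlt : n < (firstsP PySem.Set.empty 0 A).length :=
          (List.getElem?_eq_some_iff.mp hget).1
        rw [if_pos ⟨by omega, by omega⟩]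
        rw [show (0 : Int) + (n : Int) + 1 - 1 = (n : Int) by ring]
        rw [PySem.List.pyGetD_natCast]
        have hget' : (firstsP ([] : PySem.Set Int) 0 A)[n]? = some p := hget
        simp [List.getD, hget']
      | none =>
        have hge : (firstsP PySem.Set.empty 0 A).length ≤ n := by
          simpa using List.getElem?_eq_none_iff.mp hget
        rw [if_neg (by intro h; omega)]
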